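-- pv_equiv track=rewrite | github.com/ooooo-youwillsee/wechat-data-structures-and-algorithms | 1-50/25/main.py | solution
-- ===== SOURCE A (Python) =====
-- def solution(n):
--     n = n // 2 + 1
--     if n == 1:
--         return 1
--     sum = 0
--     for i in range(2, n + 1):
--         sum += pow(2 * (i - 1) + 1, 2)
--     x = 0
--     for i in range(2, n + 1):
--         x += 6 * (i - 1)
--     return sum * 4 - x * 2 + 1
-- ===== SOURCE B (Python) =====
-- def solution(n):
--     t = n // 2
--     if t <= 0:
--         return 1
--     return 8 * t * (t + 1) * (2 * t + 1) // 3 + 2 * t * (t + 1) + 4 * t + 1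
-- ===== Notes on version B (the rewrite author's own statement) =====
-- stated objective: faster
-- what changed: Replaced the two O(n) summation loops with the closed-form formulas for the sum of odd squares and the arithmetic series.
import Mathlib
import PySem

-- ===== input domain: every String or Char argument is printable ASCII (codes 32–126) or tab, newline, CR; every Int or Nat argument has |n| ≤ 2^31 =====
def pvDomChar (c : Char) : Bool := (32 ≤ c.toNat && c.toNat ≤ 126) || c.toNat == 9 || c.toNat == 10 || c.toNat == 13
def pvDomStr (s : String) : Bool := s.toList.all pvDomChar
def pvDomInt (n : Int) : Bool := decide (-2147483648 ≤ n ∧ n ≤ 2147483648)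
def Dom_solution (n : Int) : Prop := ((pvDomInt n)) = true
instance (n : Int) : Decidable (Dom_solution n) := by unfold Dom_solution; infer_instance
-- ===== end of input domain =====

-- B replaces A's two summation loops by the closed-form formulas (O(1) instead of O(n)).

-- ===== PORT A =====
def solution (n : Int) : Int :=
  let m := PySem.Int.floordiv n 2 + 1
  if m = 1 then 1
  else
    let sum := (PySem.List.pyRange 2 (m + 1) 1).foldl (fun acc i => acc + (2 * (i - 1) + 1) ^ 2) 0
    let x := (PySem.List.pyRange 2 (m + 1) 1).foldl (fun acc i => acc + 6 * (i - 1)) 0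
    sum * 4 - x * 2 + 1

-- ===== PORT B =====
def solution_alt (n : Int) : Int :=
  let t := PySem.Int.floordiv n 2
  if t ≤ 0 then 1
  else PySem.Int.floordiv (8 * t * (t + 1) * (2 * t + 1)) 3 + 2 * t * (t + 1) + 4 * t + 1

-- ===== PRECONDITION & SPEC =====
def Spec_solution (n : Int) (out : Int) : Prop := out = solution_alt n
instance (n : Int) (out : Int) : Decidable (Spec_solution n out) := by unfold Spec_solution; infer_instance

-- ===== CLAIM (what is proved, stated in full; the proofs are below) =====
def Claim_equal_solution : Prop := ∀ (n : Int), Dom_solution n → Spec_solution n (solution n)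

-- ===== LEMMAS AND PROOFS =====

-- A's first loop: 3 * Σ_{i=2}^{k+1} (2(i-1)+1)^2 = 2k(k+1)(2k+1) + 6k(k+1) + 3k
theorem pv_sumsq (k : Nat) :
    3 * (PySem.List.pyRange 2 ((k : Int) + 2) 1).foldl (fun acc i => acc + (2 * (i - 1) + 1) ^ 2) 0
      = 2 * (k : Int) * (k + 1) * (2 * k + 1) + 6 * k * (k + 1) + 3 * k := by
  induction k with
  | zero => simp [PySem.List.pyRange_one_eq_nil]
  | succ k ih =>
      push_cast
      have h : ((k : Int) + 1) + 2 = ((k : Int) + 2) + 1 := by ring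
      rw [h, PySem.List.pyRange_one_succ_right (by omega), List.foldl_append]
      simp only [List.foldl_cons, List.foldl_nil]
      nlinarith [ih]

-- A's second loop: Σ_{i=2}^{k+1} 6(i-1) = 3k(k+1)
theorem pv_sumlin (k : Nat) :
    (PySem.List.pyRange 2 ((k : Int) + 2) 1).foldl (fun acc i => acc + 6 * (i - 1)) 0
      = 3 * (k : Int) * (k + 1) := by
  induction k with
  | zero => simp [PySem.List.pyRange_one_eq_nil]
  | succ k ih =>
      push_cast
      have h : ((k : Int) + 1) + 2 = ((k : Int) + 2) + 1 := by ring
      rw [h, PySem.List.pyRange_one_succ_right (by omega), List.foldl_append]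
      simp only [List.foldl_cons, List.foldl_nil]
      nlinarith [ih]

-- exact division in B: 3 ∣ 8t(t+1)(2t+1)
theorem pv_dvd (t : Int) : (3 : Int) ∣ 8 * t * (t + 1) * (2 * t + 1) := by
  obtain ⟨u, hu⟩ : ∃ u, t = 3 * u ∨ t = 3 * u + 1 ∨ t = 3 * u + 2 := ⟨t / 3, by omega⟩
  rcases hu with h | h | h <;> subst h
  · exact ⟨8 * u * (3 * u + 1) * (6 * u + 1), by ring⟩
  · exact ⟨8 * (3 * u + 1) * (3 * u + 2) * (2 * u + 1), by ring⟩
  · exact ⟨8 * (3 * u + 2) * (u + 1) * (6 * u + 5), by ring⟩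

-- ===== VERDICT (by name: the statement is the Claim_ definition above) =====
theorem solution_spec : Claim_equal_solution := by
  intro n _
  unfold Spec_solution solution solution_alt
  set t := PySem.Int.floordiv n 2 with hT
  simp only []
  by_cases hle : t ≤ 0
  · rw [if_pos hle]
    by_cases h1 : t + 1 = 1
    · rw [if_pos h1]
    · rw [if_neg h1]
      have : t + 1 + 1 ≤ 2 := by omega
      rw [PySem.List.pyRange_one_eq_nil this]
      simp
  · rw [if_neg hle]
    have h1 : t + 1 ≠ 1 := by omega
    rw [if_neg h1]
    have hk : ∃ k : Nat, t = (k : Int) := ⟨t.toNat, by omega⟩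
    obtain ⟨k, hkeq⟩ := hk
    have hS := pv_sumsq k
    have hX := pv_sumlin k
    rw [← hkeq] at hS hX
    have hrange : t + 1 + 1 = t + 2 := by ring
    rw [hrange, hX]
    have hdvd := pv_dvd t
    obtain ⟨q, hq⟩ := hdvd
    have hfd : PySem.Int.floordiv (8 * t * (t + 1) * (2 * t + 1)) 3 = q := by
      simp [PySem.Int.floordiv, hq, Int.mul_fdiv_cancel_left]
    rw [hfd]
    nlinarith [hS, hq]
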